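-- pv_equiv track=rewrite | github.com/wojhal276002/Algorytmy_i_struktura_danych_3_semestr | algorytmy_1/allista1zad24.py | example4
-- ===== SOURCE A (Python) =====
-- def example4(A, B):
--     n = len(A)
--     count = 0
--     for i in range(n):
--         total = 0
--         for j in range(n):
--            for k in range(1+j):
--                total += A[k]
--         if B[i] == total:
--            count += 1
--     return count
-- ===== SOURCE B (Python) =====
-- def example4(A, B):
--     n = len(A)
--     running = 0
--     total = 0
--     for a in A:
--         running += a
--         total += running
--     count = 0
--     for x in B[:n]:
--         if x == total:
--             count += 1
--     return count
-- ===== Notes on version B (the rewrite author's own statement) =====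
-- stated objective: faster
-- what changed: The O(n^3) triple loop (the same aggregate recomputed for every i via nested prefix sums) is replaced by one running-prefix-sum pass over A computing the aggregate once, followed by a single counting pass over B[:n].
import Mathlib
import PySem

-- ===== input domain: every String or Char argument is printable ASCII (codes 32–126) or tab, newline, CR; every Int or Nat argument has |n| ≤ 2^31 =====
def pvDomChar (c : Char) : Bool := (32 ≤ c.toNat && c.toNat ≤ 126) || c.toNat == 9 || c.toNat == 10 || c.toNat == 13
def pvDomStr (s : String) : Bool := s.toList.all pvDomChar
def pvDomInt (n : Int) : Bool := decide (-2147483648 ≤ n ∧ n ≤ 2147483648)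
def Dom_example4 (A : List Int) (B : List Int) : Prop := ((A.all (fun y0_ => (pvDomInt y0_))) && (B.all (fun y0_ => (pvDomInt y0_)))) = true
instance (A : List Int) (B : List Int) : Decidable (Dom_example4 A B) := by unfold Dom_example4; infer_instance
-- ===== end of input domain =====

-- B replaces A's O(n^3) triple loop (the constant aggregate recomputed for every i via
-- nested prefix sums) with one running-prefix-sum pass computing the aggregate once,
-- then a single counting pass over B[:n]; objective: faster (asymptotic).

-- ===== PORT A =====
def example4 (A : List Int) (B : List Int) : Int :=
  let n : Int := A.length
  (PySem.List.pyRange 0 n 1).foldl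
    (fun count i =>
      let total := (PySem.List.pyRange 0 n 1).foldl
        (fun total j =>
          (PySem.List.pyRange 0 (1 + j) 1).foldl
            (fun t k => t + PySem.List.pyGetD A k 0) total) 0
      if PySem.List.pyGetD B i 0 = total then count + 1 else count) 0

-- ===== PORT B =====
def example4_alt (A : List Int) (B : List Int) : Int :=
  let p := A.foldl (fun (s : Int × Int) a => (s.1 + a, s.2 + (s.1 + a))) ((0 : Int), (0 : Int))
  (B.take A.length).foldl (fun c x => if x = p.2 then c + 1 else c) 0

-- ===== PRECONDITION & SPEC =====
-- Python A evaluates B[i] for every i < len(A): it raises IndexError iff len(B) < len(A).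
def Pre_example4 (A : List Int) (B : List Int) : Prop := A.length ≤ B.length
instance (A : List Int) (B : List Int) : Decidable (Pre_example4 A B) := by unfold Pre_example4; infer_instance
def pvWitness_example4 : List Int × List Int := ([1, 2], [3, 1, 2])

def Spec_example4 (A : List Int) (B : List Int) (out : Int) : Prop := out = example4_alt A B
instance (A : List Int) (B : List Int) (out : Int) : Decidable (Spec_example4 A B out) := by unfold Spec_example4; infer_instance

-- ===== CLAIM (what is proved, stated in full; the proofs are below) =====
def Claim_equal_example4 : Prop := ∀ (A : List Int) (B : List Int), Dom_example4 A B → Pre_example4 A B → Spec_example4 A B (example4 A B)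

-- ===== LEMMAS AND PROOFS =====

-- A's innermost loop adds the prefix sum A[0] + … + A[m-1] to its accumulator.
lemma innerSumA (A : List Int) : ∀ (m : Nat), m ≤ A.length → ∀ (t : Int),
    (PySem.List.pyRange 0 (m : Int) 1).foldl (fun t k => t + PySem.List.pyGetD A k 0) t
      = t + (A.take m).sum := by
  intro m
  induction m with
  | zero => intro _ t; simp
  | succ m ih =>
    intro h t
    have hm : m ≤ A.length := Nat.le_of_succ_le h
    have hcast : ((m + 1 : Nat) : Int) = (m : Int) + 1 := by push_cast; ring
    rw [hcast, PySem.List.pyRange_one_succ_right (by positivity), List.foldl_append, ih hm]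
    have hlt : m < A.length := h
    simp only [List.foldl_cons, List.foldl_nil, PySem.List.pyGetD_natCast,
      List.take_add_one, List.getElem?_eq_getElem hlt, Option.toList_some,
      List.sum_append, List.sum_cons, List.sum_nil]
    rw [List.getD_eq_getElem _ _ hlt]
    ring

-- A's middle loop accumulates the prefix sums of lengths 1..m.
lemma mid_sum (A : List Int) : ∀ (m : Nat), m ≤ A.length → ∀ (c : Int),
    (PySem.List.pyRange 0 (m : Int) 1).foldl
        (fun total j =>
          (PySem.List.pyRange 0 (1 + j) 1).foldl
            (fun t k => t + PySem.List.pyGetD A k 0) total) c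
      = c + ((List.range m).map (fun j => (A.take (j + 1)).sum)).sum := by
  intro m
  induction m with
  | zero => intro _ c; simp
  | succ m ih =>
    intro h c
    have hm : m ≤ A.length := Nat.le_of_succ_le h
    have hcast : ((m + 1 : Nat) : Int) = (m : Int) + 1 := by push_cast; ring
    rw [hcast, PySem.List.pyRange_one_succ_right (by positivity), List.foldl_append, ih hm]
    simp only [List.foldl_cons, List.foldl_nil]
    rw [show (1 : Int) + (m : Int) = ((m + 1 : Nat) : Int) by push_cast; ring,
      innerSumA A (m + 1) h, List.range_succ]
    simp only [List.map_append, List.map_cons, List.map_nil, List.sum_append,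
      List.sum_cons, List.sum_nil]
    ring

-- B's single pass over A: the pair state is (running sum, sum of all prefix sums so far).
lemma pair_fold : ∀ (A : List Int) (r t : Int),
    (A.foldl (fun (s : Int × Int) a => (s.1 + a, s.2 + (s.1 + a))) (r, t)).2
      = t + ((List.range A.length).map (fun j => r + (A.take (j + 1)).sum)).sum := by
  intro A
  induction A with
  | nil => intro r t; simp
  | cons a tl ih =>
    intro r t
    simp only [List.foldl_cons, ih]
    rw [List.length_cons, List.range_succ_eq_map]
    simp only [List.map_cons, List.map_map, List.sum_cons, Function.comp_def,
      List.take_succ_cons, List.sum_cons, Nat.succ_eq_add_one, List.take_zero,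
      List.sum_nil]
    rw [show (fun x => r + (a + (List.take (x + 1) tl).sum))
        = (fun j => r + a + (List.take (j + 1) tl).sum) from funext fun x => by ring]
    ring

-- The counting loop over indices 0..m-1 of B equals the fold over B.take m.
lemma count_fold (B : List Int) (tot : Int) : ∀ (m : Nat), m ≤ B.length → ∀ (c : Int),
    (PySem.List.pyRange 0 (m : Int) 1).foldl
        (fun c i => if PySem.List.pyGetD B i 0 = tot then c + 1 else c) c
      = (B.take m).foldl (fun c x => if x = tot then c + 1 else c) c := by
  intro m
  induction m with
  | zero => intro _ c; simp
  | succ m ih =>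
    intro h c
    have hm : m ≤ B.length := Nat.le_of_succ_le h
    have hlt : m < B.length := h
    have hcast : ((m + 1 : Nat) : Int) = (m : Int) + 1 := by push_cast; ring
    rw [hcast, PySem.List.pyRange_one_succ_right (by positivity), List.foldl_append, ih hm,
      List.take_add_one, List.foldl_append]
    simp [PySem.List.pyGetD_natCast, List.getElem?_eq_getElem hlt]

-- ===== VERDICT (by name: the statement is the Claim_ definition above) =====
theorem example4_spec : Claim_equal_example4 := by
  intro A B _ hpre
  unfold Spec_example4 example4 example4_alt
  have hp : (A.foldl (fun (s : Int × Int) a => (s.1 + a, s.2 + (s.1 + a))) ((0 : Int), (0 : Int))).2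
      = ((List.range A.length).map (fun j => (A.take (j + 1)).sum)).sum := by
    simpa using pair_fold A 0 0
  simp only [mid_sum A A.length (le_refl _), zero_add, ← hp]
  exact count_fold B _ A.length hpre 0
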